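-- pv_equiv track=rewrite | github.com/adriatp/SolveTheWordle | wordle_solver.py | different_leters_in_words
-- ===== SOURCE A (Python) =====
-- def different_leters_in_words(possible_words):
--     diff_letters = set()
--     for word in possible_words:
--         for i in range(len(word)):
--             letter = word[i]
--             reps = word[:i].count(letter)
--             regex_letter = '^.*' + letter + '.*'
--             for i in range(reps):
--                 regex_letter = regex_letter + letter + '.*'
--             regex_letter = regex_letter + '$'
--             diff_letters.add(regex_letter)
--     return diff_letters
-- ===== SOURCE B (Python) =====
-- def different_leters_in_words(possible_words):
--     diff_letters = set()
--     for word in possible_words: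
--         # stage 1: group the positions of each distinct letter
--         positions = {}
--         for i, letter in enumerate(word):
--             positions[letter] = positions.get(letter, []) + [i]
--         # stage 2: scatter each position's occurrence rank into an index table
--         occ = [0] * len(word)
--         for idxs in positions.values():
--             for j, i in enumerate(idxs):
--                 occ[i] = j + 1
--         # stage 3: emit one regex per position by direct string repetition
--         for i, letter in enumerate(word):
--             diff_letters.add('^.*' + (letter + '.*') * occ[i] + '$')
--     return diff_letters
-- ===== Notes on version B (the rewrite author's own statement) =====
-- stated objective: alternative
-- what changed: Replaces A's per-position prefix rescan word[:i].count(letter) and inner group-appending loop by a three-stage algorithm per word: group positions by letter into a dict of position lists, scatter each position's occurrence rank into an index table, then emit each regex by direct string repetition.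
import Mathlib
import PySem

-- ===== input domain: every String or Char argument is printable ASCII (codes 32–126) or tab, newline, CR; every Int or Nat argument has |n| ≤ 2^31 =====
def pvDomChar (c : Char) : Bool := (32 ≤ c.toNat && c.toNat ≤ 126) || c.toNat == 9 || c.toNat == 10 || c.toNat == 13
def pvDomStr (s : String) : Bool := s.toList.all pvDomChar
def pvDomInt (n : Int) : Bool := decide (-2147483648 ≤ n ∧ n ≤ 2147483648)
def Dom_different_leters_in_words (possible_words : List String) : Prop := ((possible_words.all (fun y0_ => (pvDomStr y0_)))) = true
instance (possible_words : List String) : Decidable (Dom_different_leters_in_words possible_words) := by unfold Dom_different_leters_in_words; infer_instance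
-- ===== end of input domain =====

-- B replaces A's per-position prefix rescans (word[:i].count) and inner repetition loop by three
-- staged passes per word: group positions by letter, scatter occurrence ranks into an index table,
-- then emit each regex by direct string repetition.

-- ===== PORT A =====
def different_leters_in_words (possible_words : List String) : List String :=
  possible_words.foldl (fun diff_letters word =>
    (PySem.List.pyRange 0 (PySem.Str.len word) 1).foldl (fun diff_letters i =>
      let letter : Char := PySem.List.pyGetD word.toList i ' '
      let reps : Nat := PySem.Chars.count (PySem.Chars.slice word.toList none (some i)) [letter]
      let regex0 : List Char := ['^', '.', '*'] ++ [letter] ++ ['.', '*']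
      let regex1 : List Char :=
        (PySem.List.pyRange 0 (reps : Int) 1).foldl (fun r _ => r ++ [letter] ++ ['.', '*']) regex0
      PySem.Set.add diff_letters (String.mk (regex1 ++ ['$']))) diff_letters) PySem.Set.empty

-- ===== PORT B =====
def different_leters_in_words_alt (possible_words : List String) : List String :=
  possible_words.foldl (fun diff_letters word =>
    let cs := word.toList
    -- stage 1: positions[letter] = positions.get(letter, []) + [i]
    let positions : PySem.Dict Char (List Int) :=
      (PySem.List.enumerate cs 0).foldl
        (fun d p => d.insert p.2 (d.getD p.2 [] ++ [p.1])) PySem.Dict.empty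
    -- stage 2: occ = [0]*len(word); for idxs in positions.values(): for j, i in enumerate(idxs): occ[i] = j + 1
    let occ : List Int :=
      positions.values.foldl (fun occ idxs =>
        (PySem.List.enumerate idxs 0).foldl
          (fun occ q => PySem.List.pySetD occ q.2 (q.1 + 1)) occ)
        (List.replicate cs.length (0 : Int))
    -- stage 3: add '^.*' + (letter + '.*') * occ[i] + '$'
    (PySem.List.enumerate cs 0).foldl (fun s p =>
      PySem.Set.add s (String.mk (['^', '.', '*'] ++
        PySem.List.pyRepeat ([p.2] ++ ['.', '*']) (PySem.List.pyGetD occ p.1 0) ++ ['$'])))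
      diff_letters) PySem.Set.empty

-- ===== PRECONDITION & SPEC =====
def Spec_different_leters_in_words (possible_words : List String) (out : List String) : Prop := out = different_leters_in_words_alt possible_words
instance (possible_words : List String) (out : List String) : Decidable (Spec_different_leters_in_words possible_words out) := by unfold Spec_different_leters_in_words; infer_instance

-- ===== CLAIM (what is proved, stated in full; the proofs are below) =====
def Claim_equal_different_leters_in_words : Prop := ∀ (possible_words : List String), Dom_different_leters_in_words possible_words → Spec_different_leters_in_words possible_words (different_leters_in_words possible_words)

-- ===== LEMMAS AND PROOFS =====

/-- The regex both programs build for the `k`-th occurrence of letter `c`. -/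
def pvRegex (c : Char) (k : Nat) : String :=
  String.mk (['^', '.', '*'] ++ (List.replicate k ([c] ++ ['.', '*'])).flatten ++ ['$'])

/-- The regex strings produced, in order, while scanning the word suffix `suf`
after the already-scanned prefix `pre` (both programs add exactly these). -/
def pvStrs (pre suf : List Char) : List String :=
  match suf with
  | [] => []
  | c :: t => pvRegex c (pre.count c + 1) :: pvStrs (pre ++ [c]) t

lemma pvCountGo_singleton (c : Char) :
    ∀ (l : List Char) (fuel acc : Nat), l.length ≤ fuel →
      PySem.Chars.count.go [c] fuel l acc = acc + l.count c := by
  intro l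
  induction l with
  | nil => intro fuel acc _; cases fuel <;> simp [PySem.Chars.count.go]
  | cons x t ih =>
    intro fuel acc h
    cases fuel with
    | zero => simp at h
    | succ f =>
      have ht : t.length ≤ f := by simpa using h
      by_cases hc : c = x
      · subst hc
        simp [PySem.Chars.count.go, List.isPrefixOf, ih f (acc + 1) ht]
        omega
      · simp [PySem.Chars.count.go, List.isPrefixOf, hc, Ne.symm hc, ih f acc ht]

lemma pvCount_singleton (s : List Char) (c : Char) :
    PySem.Chars.count s [c] = s.count c := by
  simp [PySem.Chars.count, pvCountGo_singleton c s s.length 0 le_rfl]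

lemma pvFoldl_const_append {α β : Type} (l : List β) (x1 x2 r0 : List α) :
    l.foldl (fun r _ => r ++ x1 ++ x2) r0 = r0 ++ (List.replicate l.length (x1 ++ x2)).flatten := by
  induction l generalizing r0 with
  | nil => simp
  | cons y t ih => simp [List.replicate_succ]

lemma pvA_loop (cs : List Char) :
    ∀ (suf pre : List Char) (diff : List String), cs = pre ++ suf →
    (PySem.List.pyRange (pre.length : Int) (cs.length : Int) 1).foldl (fun diff_letters i =>
      PySem.Set.add diff_letters (String.mk (
        (PySem.List.pyRange 0
            ((PySem.Chars.count (PySem.Chars.slice cs none (some i)) [PySem.List.pyGetD cs i ' ']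
              : Nat) : Int) 1).foldl
          (fun r _ => r ++ [PySem.List.pyGetD cs i ' '] ++ ['.', '*'])
          (['^', '.', '*'] ++ [PySem.List.pyGetD cs i ' '] ++ ['.', '*']) ++ ['$']))) diff
    = (pvStrs pre suf).foldl PySem.Set.add diff := by
  intro suf
  induction suf with
  | nil =>
    intro pre diff h
    subst h
    rw [PySem.List.pyRange_one_eq_nil (by simp)]
    simp [pvStrs]
  | cons ch t ih =>
    intro pre diff h
    have hlt : (pre.length : Int) < (cs.length : Int) := by
      have : pre.length < cs.length := by subst h; simp
      exact_mod_cast this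
    have hget : PySem.List.pyGetD cs (pre.length : Int) ' ' = ch := by
      subst h
      rw [PySem.List.pyGetD_natCast]
      simp
    have hslice : PySem.Chars.slice cs none (some (pre.length : Int)) = pre := by
      subst h
      rw [PySem.Chars.slice_eq_listSlice, PySem.List.slice_to _ (by positivity)]
      simp
    have h' : cs = (pre ++ [ch]) ++ t := by simp [h]
    have ihx := ih (pre ++ [ch]) (PySem.Set.add diff (pvRegex ch (pre.count ch + 1))) h'
    rw [PySem.List.pyRange_one_cons hlt, List.foldl_cons,
      show pvStrs pre (ch :: t) = pvRegex ch (pre.count ch + 1) :: pvStrs (pre ++ [ch]) t from rfl,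
      List.foldl_cons]
    rw [hget, hslice, pvCount_singleton, pvFoldl_const_append, PySem.List.length_pyRange_one]
    rw [show ['^', '.', '*'] ++ [ch] ++ ['.', '*'] ++
          (List.replicate ((((pre.count ch : Nat) : Int) - 0).toNat) ([ch] ++ ['.', '*'])).flatten ++ ['$']
        = (['^', '.', '*'] ++ (List.replicate (pre.count ch + 1) ([ch] ++ ['.', '*'])).flatten ++ ['$'])
      from by simp [List.replicate_succ]]
    rw [show (pre.length : Int) + 1 = (((pre ++ [ch]).length : Nat) : Int) from by simp]
    exact ihx

/-- The list of positions (as ints, offset by `s`) at which letter `c` occurs in `t`. -/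
def pvPos (t : List Char) (s : Int) (c : Char) : List Int :=
  ((PySem.List.enumerate t s).filter (fun p => p.2 == c)).map (·.1)

lemma pvPos_cons (x : Char) (t : List Char) (s : Int) (c : Char) :
    pvPos (x :: t) s c = (if x = c then [s] else []) ++ pvPos t (s + 1) c := by
  by_cases h : x = c <;> simp [pvPos, PySem.List.enumerate_cons, h]

lemma pvGrp (c : Char) :
    ∀ (ps : List (Int × Char)) (d : PySem.Dict Char (List Int)),
      (ps.foldl (fun d p => d.insert p.2 (d.getD p.2 [] ++ [p.1])) d).getD c []
        = d.getD c [] ++ ((ps.filter (fun p => p.2 == c)).map (·.1)) := by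
  intro ps
  induction ps with
  | nil => intro d; simp
  | cons p t ih =>
    intro d
    rw [List.foldl_cons, ih]
    by_cases h : p.2 = c
    · subst h
      simp [PySem.Dict.getD, PySem.Dict.get?_insert_self]
    · simp [PySem.Dict.getD, PySem.Dict.get?_insert_of_ne d _ (Ne.symm h), h]

lemma pvPos_sub (c : Char) :
    ∀ (t : List Char) (s : Nat) (x : Int), x ∈ pvPos t (s : Int) c →
      ∃ j : Nat, j < t.length ∧ x = ((s + j : Nat) : Int) ∧ t[j]? = some c := by
  intro t
  induction t with
  | nil => intro s x hx; simp [pvPos] at hx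
  | cons y t ih =>
    intro s x hx
    rw [pvPos_cons] at hx
    rcases List.mem_append.1 hx with h1 | h2
    · refine ⟨0, by simp, ?_, ?_⟩
      · by_cases hy : y = c <;> simp [hy] at h1; simp [h1]
      · by_cases hy : y = c <;> simp [hy] at h1 ⊢
    · have h2' : x ∈ pvPos t ((s + 1 : Nat) : Int) c := by
        have : ((s : Int) + 1) = ((s + 1 : Nat) : Int) := by push_cast; ring
        rwa [this] at h2
      obtain ⟨j, hj, hx', hg⟩ := ih (s + 1) x h2'
      exact ⟨j + 1, by simpa using hj, by rw [hx']; push_cast; ring_nf, by simpa using hg⟩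

lemma pvPos_not_mem (cs : List Char) (m : Nat) (hm : m < cs.length) (b : Char)
    (hb : cs[m] ≠ b) : ((m : Nat) : Int) ∉ pvPos cs (0 : Int) b := by
  intro hmem
  have := pvPos_sub b cs 0 (m : Int) (by simpa using hmem)
  obtain ⟨j, hj, hx, hg⟩ := this
  have hjm : j = m := by
    have : (m : Int) = ((j : Nat) : Int) := by simpa using hx
    exact_mod_cast this.symm
  subst hjm
  rw [List.getElem?_eq_getElem hj] at hg
  exact hb (by simpa using hg)

lemma pvPos_mem_rank (c : Char) :
    ∀ (t : List Char) (s m : Nat), m < t.length → t[m]? = some c →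
      (((s + m : Nat) : Int) ∈ pvPos t (s : Int) c ∧
       (pvPos t (s : Int) c).idxOf ((s + m : Nat) : Int) = (t.take m).count c) := by
  intro t
  induction t with
  | nil => intro s m hm _; simp at hm
  | cons y t ih =>
    intro s m hm hg
    rw [pvPos_cons]
    cases m with
    | zero =>
      have hy : y = c := by simpa using hg
      subst hy
      simp
    | succ m' =>
      have hm' : m' < t.length := by simpa using hm
      have hg' : t[m']? = some c := by simpa using hg
      have hcast : ((s : Int) + 1) = ((s + 1 : Nat) : Int) := by push_cast; ring
      have hrec := ih (s + 1) m' hm' hg'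
      have hx : ((s + (m' + 1) : Nat) : Int) = (((s + 1) + m' : Nat) : Int) := by push_cast; ring
      by_cases hy : y = c
      · subst hy
        have hne : (((s + 1) + m' : Nat) : Int) ≠ (s : Int) := by
          intro h
          have : (s + 1) + m' = s := by exact_mod_cast h
          omega
        rw [if_pos rfl]
        simp only [List.cons_append, List.nil_append]
        constructor
        · rw [hx, hcast]
          exact List.mem_cons_of_mem _ hrec.1
        · rw [hx, hcast, List.idxOf_cons,
            show (((s : Nat) : Int) == ((s + 1 + m' : Nat) : Int)) = false from
              beq_eq_false_iff_ne.mpr (fun h => hne h.symm),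
            cond_false, hrec.2, List.take_succ_cons, List.count_cons_self]
      · rw [if_neg hy]
        simp only [List.nil_append]
        constructor
        · rw [hx, hcast]; exact hrec.1
        · rw [hx, hcast, hrec.2, List.take_succ_cons]
          simp [hy]

lemma pvPos_pairwise (c : Char) (t : List Char) (s : Int) :
    (pvPos t s c).Pairwise (· < ·) := by
  have h := PySem.List.pairwise_lt_enumerate t s
  exact ((h.filter _).map _ (by intro a b hab; exact hab))

lemma pvPos_nodup (c : Char) (t : List Char) (s : Int) : (pvPos t s c).Nodup :=
  (pvPos_pairwise c t s).imp (fun h => ne_of_lt h)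

/-- Stage-2 inner loop: setting ranks along a group `g` of distinct non-negative
in-range indices; the value read back at `m`. -/
lemma pvInner (n : Nat) :
    ∀ (g : List Int) (s : Int) (occ : List Int) (m : Nat),
      occ.length = n → m < n → g.Nodup →
      (∀ x ∈ g, ∃ k : Nat, x = (k : Int) ∧ k < n) →
      PySem.List.pyGetD
        ((PySem.List.enumerate g s).foldl
          (fun occ q => PySem.List.pySetD occ q.2 (q.1 + 1)) occ) ((m : Nat) : Int) 0
      = if ((m : Nat) : Int) ∈ g then s + (g.idxOf ((m : Nat) : Int) : Int) + 1
        else PySem.List.pyGetD occ ((m : Nat) : Int) 0 := by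
  intro g
  induction g with
  | nil => intro s occ m _ _ _ _; simp
  | cons i g' ih =>
    intro s occ m hlen hm hnd hrange
    obtain ⟨ki, hki, hkin⟩ := hrange i (by simp)
    subst hki
    rw [PySem.List.enumerate_cons, List.foldl_cons]
    have hlen' : (PySem.List.pySetD occ ((ki : Nat) : Int) (s + 1)).length = n := by
      rw [PySem.List.length_pySetD, hlen]
    have hrec := ih (s + 1) (PySem.List.pySetD occ ((ki : Nat) : Int) (s + 1)) m hlen' hm
      (List.Nodup.of_cons hnd) (fun x hx => hrange x (by simp [hx]))
    by_cases hmi : m = ki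
    · subst hmi
      have hnotm : ((m : Nat) : Int) ∉ g' := by
        intro h; exact (List.nodup_cons.1 hnd).1 h
      rw [hrec, if_neg hnotm,
        PySem.List.pyGetD_pySetD_natCast _ _ _ _ _ (by omega : m < occ.length),
        if_pos rfl, if_pos (List.mem_cons_self)]
      simp
    · have hneq : ((m : Nat) : Int) ≠ ((ki : Nat) : Int) := by
        intro h; exact hmi (by exact_mod_cast h)
      have hpres : PySem.List.pyGetD (PySem.List.pySetD occ ((ki : Nat) : Int) (s + 1)) ((m : Nat) : Int) 0
          = PySem.List.pyGetD occ ((m : Nat) : Int) 0 := by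
        rw [PySem.List.pyGetD_pySetD_natCast _ _ _ _ _ (by omega : ki < occ.length),
          if_neg hmi]
      rw [hrec, hpres]
      by_cases hmem : ((m : Nat) : Int) ∈ g'
      · rw [if_pos hmem, if_pos (by simp [hmem])]
        rw [List.idxOf_cons,
          show ((((ki : Nat) : Int)) == (((m : Nat) : Int))) = false from
            beq_eq_false_iff_ne.mpr (Ne.symm hneq), cond_false]
        push_cast
        ring
      · rw [if_neg hmem, if_neg (by simp [hneq, hmem])]

lemma pvFold_len (l : List (Int × Int)) :
    ∀ occ : List Int,
      (l.foldl (fun occ q => PySem.List.pySetD occ q.2 (q.1 + 1)) occ).length = occ.length := by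
  induction l with
  | nil => intro occ; rfl
  | cons q t iht =>
    intro occ
    rw [List.foldl_cons, iht, PySem.List.length_pySetD]

/-- Stage-2 outer loop over the groups of the distinct letters `ks`:
the value read back at position `m`, whose letter is `c`. -/
lemma pvOuter (cs : List Char) (m : Nat) (c : Char) (hm : m < cs.length)
    (hc : cs[m]? = some c) :
    ∀ (ks : List Char) (occ : List Int), ks.Nodup → occ.length = cs.length →
      PySem.List.pyGetD
        ((ks.map (fun k => pvPos cs 0 k)).foldl (fun occ idxs =>
          (PySem.List.enumerate idxs 0).foldl
            (fun occ q => PySem.List.pySetD occ q.2 (q.1 + 1)) occ) occ) ((m : Nat) : Int) 0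
      = if c ∈ ks then (((cs.take m).count c : Nat) : Int) + 1
        else PySem.List.pyGetD occ ((m : Nat) : Int) 0 := by
  intro ks
  induction ks with
  | nil => intro occ _ _; simp
  | cons k ks' ih =>
    intro occ hnd hlen
    rw [List.map_cons, List.foldl_cons]
    have hrange : ∀ x ∈ pvPos cs 0 k, ∃ j : Nat, x = (j : Int) ∧ j < cs.length := by
      intro x hx
      obtain ⟨j, hj, hx', _⟩ := pvPos_sub k cs 0 x (by simpa using hx)
      exact ⟨j, by simpa using hx', hj⟩
    have hinner := pvInner cs.length (pvPos cs 0 k) 0 occ m hlen hm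
      (pvPos_nodup k cs 0) hrange
    have hlen2 : ((PySem.List.enumerate (pvPos cs 0 k) 0).foldl
        (fun occ q => PySem.List.pySetD occ q.2 (q.1 + 1)) occ).length = cs.length := by
      rw [pvFold_len, hlen]
    rw [ih _ (List.Nodup.of_cons hnd) hlen2]
    by_cases hck : k = c
    · subst hck
      have hrank := pvPos_mem_rank k cs 0 m hm hc
      have hcin : ((m : Nat) : Int) ∈ pvPos cs 0 k := by simpa using hrank.1
      have hnotin : k ∉ ks' := (List.nodup_cons.1 hnd).1
      rw [if_neg hnotin, if_pos (by simp), hinner, if_pos hcin]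
      rw [show (pvPos cs (0 : Int) k).idxOf ((m : Nat) : Int) = (cs.take m).count k from by
        simpa using hrank.2]
      ring
    · by_cases hmem : c ∈ ks'
      · simp [hmem]
      · have hcm : cs[m] = c := by
          rw [List.getElem?_eq_getElem hm] at hc
          simpa using hc
        have hcsm : cs[m] ≠ k := by
          rw [hcm]; intro h; exact hck h.symm
        rw [if_neg hmem, if_neg (by simp only [List.mem_cons]; rintro (h | h); exact hck h.symm; exact hmem h), hinner,
          if_neg (pvPos_not_mem cs m hm k hcsm)]

/-- The `occ` table B builds holds, at each position, the prefix count of that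
position's letter plus one. -/
lemma pvOcc (cs : List Char) (m : Nat) (hm : m < cs.length) :
    PySem.List.pyGetD
      (((PySem.List.enumerate cs 0).foldl
          (fun d p => d.insert p.2 (d.getD p.2 [] ++ [p.1]))
          (PySem.Dict.empty : PySem.Dict Char (List Int))).values.foldl
        (fun occ idxs =>
          (PySem.List.enumerate idxs 0).foldl
            (fun occ q => PySem.List.pySetD occ q.2 (q.1 + 1)) occ)
        (List.replicate cs.length (0 : Int))) ((m : Nat) : Int) 0
    = (((cs.take m).count cs[m] : Nat) : Int) + 1 := by
  set d := (PySem.List.enumerate cs 0).foldl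
      (fun d p => d.insert p.2 (d.getD p.2 [] ++ [p.1]))
      (PySem.Dict.empty : PySem.Dict Char (List Int)) with hd
  have hkeys : d.keys = PySem.Set.ofList cs := by
    rw [hd, PySem.Dict.keys_foldl_insert_key (key := fun p : Int × Char => p.2)]
    simp [PySem.Dict.empty, PySem.Dict.keys, PySem.List.map_snd_enumerate,
      PySem.Set.update, PySem.Set.ofList_eq_foldl]
  have hknd : d.keys.Nodup := by rw [hkeys]; exact PySem.Set.nodup_ofList cs
  have hvals : d.values = d.keys.map (fun k => d.getD k []) :=
    PySem.Dict.values_eq_map_keys d hknd []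
  have hgetD : ∀ k, d.getD k [] = pvPos cs 0 k := by
    intro k
    rw [hd, pvGrp k]
    simp [PySem.Dict.getD, PySem.Dict.empty, PySem.Dict.get?, pvPos]
  have hvals2 : d.values = d.keys.map (fun k => pvPos cs 0 k) := by
    rw [hvals]; exact List.map_congr_left (fun k _ => hgetD k)
  rw [hvals2]
  have hc : cs[m]? = some cs[m] := List.getElem?_eq_getElem hm
  rw [pvOuter cs m cs[m] hm hc d.keys (List.replicate cs.length (0 : Int)) hknd (by simp)]
  rw [if_pos (by rw [hkeys]; exact (PySem.Set.mem_ofList _ _).2 (cs.getElem_mem hm))]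

/-- Stage-3 emission pass equals the reference stream `pvStrs`. -/
lemma pvB_emit (cs : List Char) (occ : List Int)
    (hocc : ∀ (k : Nat) (hk : k < cs.length),
      PySem.List.pyGetD occ ((k : Nat) : Int) 0 = (((cs.take k).count (cs[k]'hk) : Nat) : Int) + 1) :
    ∀ (suf pre : List Char) (diff : List String), cs = pre ++ suf →
    (PySem.List.enumerate suf ((pre.length : Nat) : Int)).foldl (fun s p =>
      PySem.Set.add s (String.mk (['^', '.', '*'] ++
        PySem.List.pyRepeat ([p.2] ++ ['.', '*']) (PySem.List.pyGetD occ p.1 0) ++ ['$']))) diff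
    = (pvStrs pre suf).foldl PySem.Set.add diff := by
  intro suf
  induction suf with
  | nil => intro pre diff _; simp [pvStrs]
  | cons ch t ih =>
    intro pre diff h
    have hm : pre.length < cs.length := by subst h; simp
    have hgm : cs[pre.length]'hm = ch := by
      subst h; simp
    have hval : PySem.List.pyGetD occ ((pre.length : Nat) : Int) 0
        = ((pre.count ch : Nat) : Int) + 1 := by
      rw [hocc pre.length hm, hgm]
      subst h
      simp
    rw [PySem.List.enumerate_cons, List.foldl_cons,
      show pvStrs pre (ch :: t) = pvRegex ch (pre.count ch + 1) :: pvStrs (pre ++ [ch]) t from rfl,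
      List.foldl_cons]
    have hstr : String.mk (['^', '.', '*'] ++
        PySem.List.pyRepeat ([ch] ++ ['.', '*']) (PySem.List.pyGetD occ ((pre.length : Nat) : Int) 0) ++ ['$'])
        = pvRegex ch (pre.count ch + 1) := by
      rw [hval, show ((pre.count ch : Nat) : Int) + 1 = ((pre.count ch + 1 : Nat) : Int) from by
        push_cast; ring]
      simp [PySem.List.pyRepeat, pvRegex]
    have hcast : ((pre.length : Nat) : Int) + 1 = (((pre ++ [ch]).length : Nat) : Int) := by
      simp
    dsimp only
    rw [hstr, hcast]
    exact ih (pre ++ [ch]) (PySem.Set.add diff (pvRegex ch (pre.count ch + 1))) (by simp [h])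

-- ===== VERDICT (by name: the statement is the Claim_ definition above) =====
theorem different_leters_in_words_spec : Claim_equal_different_leters_in_words := by
  intro pw _
  unfold Spec_different_leters_in_words different_leters_in_words different_leters_in_words_alt
  apply PySem.List.foldl_congr_mem
  intro diff word _
  dsimp only
  have hocc : ∀ (k : Nat) (hk : k < word.toList.length),
      PySem.List.pyGetD
        (((PySem.List.enumerate word.toList 0).foldl
            (fun d p => d.insert p.2 (d.getD p.2 [] ++ [p.1]))
            (PySem.Dict.empty : PySem.Dict Char (List Int))).values.foldl
          (fun occ idxs =>
            (PySem.List.enumerate idxs 0).foldl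
              (fun occ q => PySem.List.pySetD occ q.2 (q.1 + 1)) occ)
          (List.replicate word.toList.length (0 : Int))) ((k : Nat) : Int) 0
      = (((word.toList.take k).count (word.toList[k]'hk) : Nat) : Int) + 1 :=
    fun k hk => pvOcc word.toList k hk
  have hB := pvB_emit word.toList _ hocc word.toList [] diff (by simp)
  have hA := pvA_loop word.toList word.toList [] diff (by simp)
  simp only [List.length_nil, Nat.cast_zero] at hA hB
  rw [show PySem.Str.len word = ((word.toList.length : Nat) : Int) from by
        simp [PySem.Str.len_eq], hB, ← hA]
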